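-- pv_equiv track=rewrite | github.com/mingyyy/backtesting | simulation/prices_generator_new.py | ticker_generator
-- ===== SOURCE A (Python) =====
-- def ticker_generator(number_of_tickers):
--     list_tickers = []
--     i = 0
--     # for a1 in list('ABCDEFGHIJKLMNOPQRSTUVWXYZ'):
--     #     for a2 in list('ABCDEFGHIJKLMNOPQRSTUVWXYZ'):
--     #         for a3 in list('ABCDEFGHIJKLMNOPQRSTUVWXYZ'):
--     #             for a4 in list('ABCDEFGHIJKLMNOPQRSTUVWXYZ'):
--     #                 ticker = 'SI' + a1 + a2 + a3 + a4
--     #                 list_tickers.append(ticker)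
--     #                 i = i+1
--     #                 if i == number_of_tickers:
--     #                     return list_tickers
--     a1='E' \
--        ''
--     for a2 in list('ABCDEFGHIJKLMNOPQRSTUVWXYZ'):
--         for a3 in list('ABCDEFGHIJKLMNOPQRSTUVWXYZ'):
--             for a4 in list('ABCDEFGHIJKLMNOPQRSTUVWXYZ'):
--                 ticker = 'SI' + a1 + a2 + a3 + a4
--                 list_tickers.append(ticker)
--                 i = i+1
--                 if i == number_of_tickers:
--                     return list_tickers
-- ===== SOURCE B (Python) =====
-- ALPHA = 'ABCDEFGHIJKLMNOPQRSTUVWXYZ'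
--
-- def ticker_generator(number_of_tickers):
--     if not (1 <= number_of_tickers <= 17576):
--         return None
--     return ['SIE' + ALPHA[k // 676] + ALPHA[(k // 26) % 26] + ALPHA[k % 26]
--             for k in range(number_of_tickers)]
-- ===== Notes on version B (the rewrite author's own statement) =====
-- stated objective: simpler
-- what changed: Replaces the three nested letter loops with an early-return counter by a single pass over a linear index k, decoding each ticker's three letters by base-26 arithmetic (k//676, (k//26)%26, k%26).
-- outside the precondition, e.g. on ticker_generator(0): A returns None, B returns None; on ticker_generator(20000): A returns None, B returns None
import Mathlib
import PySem

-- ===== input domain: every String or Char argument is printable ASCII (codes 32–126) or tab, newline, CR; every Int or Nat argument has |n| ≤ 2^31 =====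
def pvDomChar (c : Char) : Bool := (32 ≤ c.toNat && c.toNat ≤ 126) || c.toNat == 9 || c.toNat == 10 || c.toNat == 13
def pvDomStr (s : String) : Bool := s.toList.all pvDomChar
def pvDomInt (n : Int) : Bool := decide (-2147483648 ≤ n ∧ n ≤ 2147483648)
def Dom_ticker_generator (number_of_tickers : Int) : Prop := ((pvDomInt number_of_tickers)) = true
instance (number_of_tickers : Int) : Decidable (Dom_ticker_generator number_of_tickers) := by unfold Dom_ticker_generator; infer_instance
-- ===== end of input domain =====

-- B replaces A's three nested letter loops (with an early-return counter) by a single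
-- linear pass decoding each ticker from its index by base-26 arithmetic (objective: simpler).

-- ===== PORT A =====
def pvAlpha : List Char :=
  ['A','B','C','D','E','F','G','H','I','J','K','L','M',
   'N','O','P','Q','R','S','T','U','V','W','X','Y','Z']

-- ticker = 'SI' + a1 + a2 + a3 + a4  with a1 = 'E'  (string concatenation, exact)
def pvTick (a2 a3 a4 : Char) : String := String.mk ['S','I','E',a2,a3,a4]

-- innermost `for a4 in …` loop; .inr = the `return` was taken
def pvLoop3 (n : Int) (a2 a3 : Char) :
    List Char → List String → Int → (List String × Int) ⊕ List String
  | [], acc, i => .inl (acc, i)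
  | a4 :: rest, acc, i =>
    let acc' := acc ++ [pvTick a2 a3 a4]
    if i + 1 = n then .inr acc' else pvLoop3 n a2 a3 rest acc' (i + 1)

-- middle `for a3 in …` loop
def pvLoop2 (n : Int) (a2 : Char) :
    List Char → List String → Int → (List String × Int) ⊕ List String
  | [], acc, i => .inl (acc, i)
  | a3 :: rest, acc, i =>
    match pvLoop3 n a2 a3 pvAlpha acc i with
    | .inr r => .inr r
    | .inl (acc', i') => pvLoop2 n a2 rest acc' i'

-- outer `for a2 in …` loop
def pvLoop1 (n : Int) :
    List Char → List String → Int → (List String × Int) ⊕ List String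
  | [], acc, i => .inl (acc, i)
  | a2 :: rest, acc, i =>
    match pvLoop2 n a2 pvAlpha acc i with
    | .inr r => .inr r
    | .inl (acc', i') => pvLoop1 n rest acc' i'

def ticker_generator (number_of_tickers : Int) : List String :=
  match pvLoop1 number_of_tickers pvAlpha [] 0 with
  | .inr r => r
  | .inl (acc, _) => acc  -- Python falls off the loops and returns None here (excluded by Pre_)

-- ===== PORT B =====
-- 'SIE' + ALPHA[k//676] + ALPHA[(k//26)%26] + ALPHA[k%26]; indices are always in range
def pvTickOf (k : Int) : String :=
  String.mk ('S' :: 'I' :: 'E' ::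
    [(PySem.List.pyGet? pvAlpha (PySem.Int.floordiv k 676)).getD 'A',
     (PySem.List.pyGet? pvAlpha (PySem.Int.mod (PySem.Int.floordiv k 26) 26)).getD 'A',
     (PySem.List.pyGet? pvAlpha (PySem.Int.mod k 26)).getD 'A'])

def ticker_generator_alt (number_of_tickers : Int) : List String :=
  if 1 ≤ number_of_tickers ∧ number_of_tickers ≤ 17576 then
    (PySem.List.pyRange 0 number_of_tickers 1).map pvTickOf
  else []  -- Python B returns None here, outside Pre_

-- ===== PRECONDITION & SPEC =====
-- Pre_ excludes the inputs (n ≤ 0 or n > 17576) on which A falls off its loops and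
-- returns None, which is not a value of the declared list type; B also returns None there.
def Pre_ticker_generator (number_of_tickers : Int) : Prop :=
  1 ≤ number_of_tickers ∧ number_of_tickers ≤ 17576
instance (number_of_tickers : Int) : Decidable (Pre_ticker_generator number_of_tickers) := by
  unfold Pre_ticker_generator; infer_instance

def pvWitness_ticker_generator : Int := (30)

def Spec_ticker_generator (number_of_tickers : Int) (out : List String) : Prop :=
  out = ticker_generator_alt number_of_tickers
instance (number_of_tickers : Int) (out : List String) :
    Decidable (Spec_ticker_generator number_of_tickers out) := by
  unfold Spec_ticker_generator; infer_instance

-- ===== CLAIM (what is proved, stated in full; the proofs are below) =====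
def Claim_equal_ticker_generator : Prop :=
  ∀ (number_of_tickers : Int), Dom_ticker_generator number_of_tickers →
    Pre_ticker_generator number_of_tickers →
    Spec_ticker_generator number_of_tickers (ticker_generator number_of_tickers)

-- ===== LEMMAS AND PROOFS =====

-- the full block of 17576 tickers, in A's generation order
def pvAll : List String :=
  pvAlpha.flatMap (fun a2 => pvAlpha.flatMap (fun a3 => pvAlpha.map (pvTick a2 a3)))

-- index-decoded ticker over Nat
def pvGN (k : Nat) : String :=
  pvTick (pvAlpha.getD (k / 676) 'A') (pvAlpha.getD (k / 26 % 26) 'A') (pvAlpha.getD (k % 26) 'A')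

lemma pvLoop3_spec (n : Int) (a2 a3 : Char) :
    ∀ (cs : List Char) (acc : List String) (i : Int),
    pvLoop3 n a2 a3 cs acc i =
      if i < n ∧ n ≤ i + cs.length then
        .inr (acc ++ (cs.map (pvTick a2 a3)).take (n - i).toNat)
      else .inl (acc ++ cs.map (pvTick a2 a3), i + cs.length) := by
  intro cs
  induction cs with
  | nil =>
    intro acc i
    simp only [pvLoop3]
    rw [if_neg (by simp)]
    simp
  | cons c rest ih =>
    intro acc i
    simp only [pvLoop3]
    by_cases h : i + 1 = n
    · rw [if_pos h]
      have hc : i < n ∧ n ≤ i + ((c :: rest).length : Int) := by simp; omega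
      rw [if_pos hc]
      have h1 : (n - i).toNat = 1 := by omega
      simp [h1]
    · rw [if_neg h, ih]
      split_ifs with h1 h2 h2
      · have ht : (n - i).toNat = (n - (i + 1)).toNat + 1 := by omega
        simp [ht, List.take_succ_cons]
      · exfalso; simp at h1 h2; omega
      · exfalso; simp at h1 h2; omega
      · simp only [List.map_cons, List.length_cons, Sum.inl.injEq, Prod.mk.injEq]
        constructor
        · simp
        · push_cast; ring

lemma pvLoop2_spec (n : Int) (a2 : Char) :
    ∀ (cs : List Char) (acc : List String) (i : Int),
    pvLoop2 n a2 cs acc i =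
      if i < n ∧ n ≤ i + 26 * cs.length then
        .inr (acc ++ ((cs.flatMap (fun a3 => pvAlpha.map (pvTick a2 a3))).take (n - i).toNat))
      else .inl (acc ++ cs.flatMap (fun a3 => pvAlpha.map (pvTick a2 a3)), i + 26 * cs.length) := by
  intro cs
  induction cs with
  | nil =>
    intro acc i
    simp only [pvLoop2]
    rw [if_neg (by simp)]
    simp
  | cons c rest ih =>
    intro acc i
    simp only [pvLoop2, pvLoop3_spec]
    have hlen : ((pvAlpha.length : Int)) = 26 := by decide
    have hL : (List.map (pvTick a2 c) pvAlpha).length = 26 := by simp [pvAlpha]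
    by_cases h : i < n ∧ n ≤ i + 26
    · rw [if_pos (by rw [hlen]; exact h)]
      rw [if_pos (by simp; omega)]
      simp only [List.flatMap_cons]
      rw [List.take_append]
      have h0 : (n - i).toNat - (List.map (pvTick a2 c) pvAlpha).length = 0 := by
        rw [hL]; omega
      rw [h0]
      simp
    · rw [if_neg (by rw [hlen]; exact h)]
      dsimp only
      rw [hlen, ih]
      have hfm : (c :: rest).flatMap (fun a3 => pvAlpha.map (pvTick a2 a3)) =
          List.map (pvTick a2 c) pvAlpha ++ rest.flatMap (fun a3 => pvAlpha.map (pvTick a2 a3)) := by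
        simp
      rw [hfm]
      simp only [List.length_cons]
      push_cast
      split_ifs with h1 h2 h2
      · rw [List.take_append]
        rw [List.take_of_length_le (l := List.map (pvTick a2 c) pvAlpha) (by rw [hL]; omega)]
        have e1 : (n - i).toNat - (List.map (pvTick a2 c) pvAlpha).length = (n - (i + 26)).toNat := by
          rw [hL]; omega
        rw [e1]
        simp [List.append_assoc]
      · exfalso; omega
      · exfalso; omega
      · simp only [Sum.inl.injEq, Prod.mk.injEq, List.append_assoc]
        exact ⟨trivial, by omega⟩

lemma pvLoop1_spec (n : Int) :
    ∀ (cs : List Char) (acc : List String) (i : Int),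
    pvLoop1 n cs acc i =
      if i < n ∧ n ≤ i + 676 * cs.length then
        .inr (acc ++ ((cs.flatMap (fun a2 => pvAlpha.flatMap (fun a3 => pvAlpha.map (pvTick a2 a3)))).take (n - i).toNat))
      else .inl (acc ++ cs.flatMap (fun a2 => pvAlpha.flatMap (fun a3 => pvAlpha.map (pvTick a2 a3))), i + 676 * cs.length) := by
  intro cs
  induction cs with
  | nil =>
    intro acc i
    simp only [pvLoop1]
    rw [if_neg (by simp)]
    simp
  | cons c rest ih =>
    intro acc i
    simp only [pvLoop1, pvLoop2_spec]
    have hlen : (26 : Int) * ((pvAlpha.length : Int)) = 676 := by decide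
    have hB : (pvAlpha.flatMap (fun a3 => pvAlpha.map (pvTick c a3))).length = 676 := by
      simp only [List.length_flatMap, List.length_map]
      decide
    by_cases h : i < n ∧ n ≤ i + 676
    · rw [if_pos (by rw [hlen]; exact h)]
      rw [if_pos (by simp; omega)]
      simp only [List.flatMap_cons]
      rw [List.take_append]
      have h0 : (n - i).toNat - (pvAlpha.flatMap (fun a3 => pvAlpha.map (pvTick c a3))).length = 0 := by
        rw [hB]; omega
      rw [h0]
      simp
    · rw [if_neg (by rw [hlen]; exact h)]
      dsimp only
      rw [hlen, ih]
      have hfm : (c :: rest).flatMap (fun a2 => pvAlpha.flatMap (fun a3 => pvAlpha.map (pvTick a2 a3))) =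
          pvAlpha.flatMap (fun a3 => pvAlpha.map (pvTick c a3)) ++
            rest.flatMap (fun a2 => pvAlpha.flatMap (fun a3 => pvAlpha.map (pvTick a2 a3))) := by
        simp
      rw [hfm]
      simp only [List.length_cons]
      push_cast
      split_ifs with h1 h2 h2
      · rw [List.take_append]
        rw [List.take_of_length_le (l := pvAlpha.flatMap (fun a3 => pvAlpha.map (pvTick c a3))) (by rw [hB]; omega)]
        have e1 : (n - i).toNat - (pvAlpha.flatMap (fun a3 => pvAlpha.map (pvTick c a3))).length
            = (n - (i + 676)).toNat := by
          rw [hB]; omega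
        rw [e1]
        simp [List.append_assoc]
      · exfalso; omega
      · exfalso; omega
      · simp only [Sum.inl.injEq, Prod.mk.injEq, List.append_assoc]
        exact ⟨trivial, by omega⟩

lemma pvA_eq_take (n : Int) (h1 : 1 ≤ n) (h2 : n ≤ 17576) :
    ticker_generator n = pvAll.take n.toNat := by
  unfold ticker_generator
  rw [pvLoop1_spec]
  rw [if_pos (by simp [pvAlpha]; omega)]
  dsimp only
  simp [pvAll]

-- decompose a range over a product into nested ranges
lemma pvRangeMul (a b : Nat) (f : Nat → String) :
    (List.range (a * b)).map f
      = (List.range a).flatMap (fun i => (List.range b).map (fun j => f (b * i + j))) := by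
  induction a with
  | zero => simp
  | succ a ih =>
    have h1 : (a + 1) * b = a * b + b := by ring
    rw [h1, List.range_add, List.map_append, ih, List.range_succ, List.flatMap_append]
    congr 1
    simp only [List.flatMap_cons, List.flatMap_nil, List.append_nil, List.map_map]
    exact List.map_congr_left fun j _ => by simp [Function.comp, Nat.mul_comm]

lemma pvFlatMapCongr {α β : Type} (l : List α) (f g : α → List β)
    (h : ∀ x ∈ l, f x = g x) : l.flatMap f = l.flatMap g := by
  induction l with
  | nil => rfl
  | cons a t ih =>
    simp only [List.flatMap_cons]
    rw [h a (by simp), ih (fun x hx => h x (by simp [hx]))]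

lemma pvFlatMapGet (l : List Char) (F : Char → List String) :
    l.flatMap F = (List.range l.length).flatMap (fun i => F (l.getD i 'A')) := by
  induction l with
  | nil => simp
  | cons c t ih =>
    simp only [List.flatMap_cons, List.length_cons, List.range_succ_eq_map,
      List.flatMap_map, List.getD_cons_zero]
    rw [ih]
    congr 1

lemma pvMapGet (l : List Char) (F : Char → String) :
    l.map F = (List.range l.length).map (fun i => F (l.getD i 'A')) := by
  induction l with
  | nil => simp
  | cons c t ih =>
    simp only [List.map_cons, List.length_cons, List.range_succ_eq_map,
      List.map_map, List.getD_cons_zero]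
    rw [ih]
    congr 1

lemma pvAll_eq : pvAll = (List.range 17576).map pvGN := by
  have h1 : (List.range 17576).map pvGN
      = (List.range 26).flatMap (fun i2 => (List.range 676).map (fun j => pvGN (676 * i2 + j))) := by
    have h := pvRangeMul 26 676 pvGN
    norm_num at h
    exact h
  have h2 : ∀ i2 : Nat, (List.range 676).map (fun j => pvGN (676 * i2 + j))
      = (List.range 26).flatMap (fun i3 => (List.range 26).map (fun i4 => pvGN (676 * i2 + (26 * i3 + i4)))) := by
    intro i2
    have h := pvRangeMul 26 26 (fun j => pvGN (676 * i2 + j))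
    norm_num at h
    exact h
  have h3 : ∀ i2 i3 i4 : Nat, i2 < 26 → i3 < 26 → i4 < 26 →
      pvGN (676 * i2 + (26 * i3 + i4))
        = pvTick (pvAlpha.getD i2 'A') (pvAlpha.getD i3 'A') (pvAlpha.getD i4 'A') := by
    intro i2 i3 i4 hi2 hi3 hi4
    unfold pvGN
    have e1 : (676 * i2 + (26 * i3 + i4)) / 676 = i2 := by omega
    have e2 : (676 * i2 + (26 * i3 + i4)) / 26 % 26 = i3 := by omega
    have e3 : (676 * i2 + (26 * i3 + i4)) % 26 = i4 := by omega
    rw [e1, e2, e3]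
  have hlen : pvAlpha.length = 26 := by decide
  rw [h1]
  unfold pvAll
  rw [pvFlatMapGet pvAlpha, hlen]
  refine pvFlatMapCongr _ _ _ ?_
  intro i2 hi2
  rw [h2, pvFlatMapGet pvAlpha, hlen]
  refine pvFlatMapCongr _ _ _ ?_
  intro i3 hi3
  rw [pvMapGet pvAlpha, hlen]
  refine List.map_congr_left ?_
  intro i4 hi4
  exact (h3 i2 i3 i4 (List.mem_range.1 hi2) (List.mem_range.1 hi3) (List.mem_range.1 hi4)).symm

lemma pvTickOf_eq (k : Nat) : pvTickOf (k : Int) = pvGN k := by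
  unfold pvTickOf pvGN pvTick
  have f676 : PySem.Int.floordiv (k : Int) 676 = ((k / 676 : Nat) : Int) := by
    exact_mod_cast PySem.Int.floordiv_natCast k 676
  have f26 : PySem.Int.floordiv (k : Int) 26 = ((k / 26 : Nat) : Int) := by
    exact_mod_cast PySem.Int.floordiv_natCast k 26
  have m26 : PySem.Int.mod (k : Int) 26 = ((k % 26 : Nat) : Int) := by
    exact_mod_cast PySem.Int.mod_natCast k 26
  have mm : PySem.Int.mod ((k / 26 : Nat) : Int) 26 = ((k / 26 % 26 : Nat) : Int) := by
    exact_mod_cast PySem.Int.mod_natCast (k / 26) 26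
  have g1 : ∀ m : Nat, (PySem.List.pyGet? pvAlpha ((m : Nat) : Int)).getD 'A' = pvAlpha.getD m 'A' := by
    intro m
    rw [PySem.List.pyGet?_natCast, List.getD_eq_getElem?_getD]
  rw [f676, f26, m26, mm, g1, g1, g1]

lemma pvB_eq_take (n : Int) (h1 : 1 ≤ n) (h2 : n ≤ 17576) :
    ticker_generator_alt n = pvAll.take n.toNat := by
  simp only [ticker_generator_alt]
  rw [if_pos ⟨h1, h2⟩]
  have hn : n = ((n.toNat : Nat) : Int) := by omega
  conv_lhs => rw [hn]
  rw [PySem.List.pyRange_zero_natCast, List.map_map]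
  rw [pvAll_eq, ← List.map_take, List.take_range]
  have hmin : min n.toNat 17576 = n.toNat := by omega
  rw [hmin]
  exact List.map_congr_left fun k _ => pvTickOf_eq k

-- ===== VERDICT (by name: the statement is the Claim_ definition above) =====
theorem ticker_generator_spec : Claim_equal_ticker_generator := by
  intro n _ hpre
  unfold Spec_ticker_generator
  rw [pvA_eq_take n hpre.1 hpre.2, pvB_eq_take n hpre.1 hpre.2]
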